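-- pv_equiv track=rewrite | github.com/x-sqrd/Blinding-Lights | borderoccurence.py | smoothenBorder
-- ===== SOURCE A (Python) =====
-- def smoothenBorder(borderList):
--     """
--     Finds the topmost, leftmost, bottommost, and rightmost points in a given list of points
--     """
--     top = borderList[0]
--     bottom = borderList[0]
--     left = borderList[0]
--     right = borderList[0]
--
--     for point in borderList:
--         # Looking for topmost point
--         if point[1] > top[1]:
--             top = point
--         elif point[1] == top[1] and point[0] > top[0]:
--             # When in doubt, pick the rightmost one
--             top = point
--
--         # Looking for bottommost point
--         if point[1] < bottom[1]:
--             bottom = point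
--         elif point[1] == bottom[1] and point[0] < bottom[0]:
--             # When in doubt, pick the leftmost one
--             bottom = point
--
--         # Looking for rightmost point
--         if point[0] > right[0]:
--             right = point
--         elif point[0] == right[0] and point[1] < right[1]:
--             # When in doubt, pick the bottommost one
--             right = point
--
--         # Looking for leftmost point
--         if point[0] < left[0]:
--             left = point
--         elif point[0] == left[0] and point[1] > left[1]:
--             # When in doubt, pick the topmost one
--             left = point
--
--     return top, bottom, left, right
-- ===== SOURCE B (Python) =====
-- def smoothenBorder(borderList):
--     """
--     Finds the topmost, leftmost, bottommost, and rightmost points in a given list of points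
--     """
--     byY = sorted(borderList, key=lambda p: (p[1], p[0]))
--     byX = sorted(borderList, key=lambda p: (p[0], -p[1]))
--     return byY[-1], byY[0], byX[0], byX[-1]
-- ===== Notes on version B (the rewrite author's own statement) =====
-- stated objective: alternative
-- what changed: Replaces A's single accumulator loop with four branch pairs by two stable sorts under composite keys ((y,x) and (x,-y)) and reading top/bottom and right/left off the last/first elements of the sorted lists.
import Mathlib
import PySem

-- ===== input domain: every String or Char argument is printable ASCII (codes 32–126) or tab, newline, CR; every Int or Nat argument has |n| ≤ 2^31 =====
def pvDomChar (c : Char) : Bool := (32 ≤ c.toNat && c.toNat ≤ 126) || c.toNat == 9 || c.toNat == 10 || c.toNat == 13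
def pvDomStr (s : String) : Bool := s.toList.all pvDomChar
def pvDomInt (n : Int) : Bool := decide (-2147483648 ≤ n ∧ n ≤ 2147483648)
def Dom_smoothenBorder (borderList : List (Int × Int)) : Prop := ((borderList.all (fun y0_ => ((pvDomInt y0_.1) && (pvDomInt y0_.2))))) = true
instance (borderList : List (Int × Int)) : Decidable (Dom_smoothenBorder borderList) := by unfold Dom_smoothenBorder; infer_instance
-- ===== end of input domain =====

-- B replaces A's single accumulator loop by two stable sorts (keys (y,x) and (x,-y)) and reads the four extreme points off the ends of the sorted lists (alternative algorithm; O(n log n) vs A's O(n)).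


-- ===== PORT A =====
-- one iteration of A's loop body on state (top, bottom, left, right)
def aStep (s : (Int × Int) × (Int × Int) × (Int × Int) × (Int × Int)) (point : Int × Int) :
    (Int × Int) × (Int × Int) × (Int × Int) × (Int × Int) :=
  let top := s.1; let bottom := s.2.1; let left := s.2.2.1; let right := s.2.2.2
  let top := if point.2 > top.2 then point
             else if point.2 = top.2 ∧ point.1 > top.1 then point else top
  let bottom := if point.2 < bottom.2 then point
                else if point.2 = bottom.2 ∧ point.1 < bottom.1 then point else bottom
  let right := if point.1 > right.1 then point
               else if point.1 = right.1 ∧ point.2 < right.2 then point else right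
  let left := if point.1 < left.1 then point
              else if point.1 = left.1 ∧ point.2 > left.2 then point else left
  (top, bottom, left, right)

def smoothenBorder (borderList : List (Int × Int)) : (Int × Int) × (Int × Int) × (Int × Int) × (Int × Int) :=
  match borderList with
  | [] => ((0, 0), (0, 0), (0, 0), (0, 0))   -- Python raises IndexError here (excluded by Pre_)
  | h :: _ => borderList.foldl aStep (h, h, h, h)

-- ===== PORT B =====
-- Python tuple keys (p[1], p[0]) and (p[0], -p[1]) compare lexicographically: the Lex order on Int × Int
def keyYX (p : Int × Int) : Lex (Int × Int) := toLex (p.2, p.1)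
def keyXnegY (p : Int × Int) : Lex (Int × Int) := toLex (p.1, -p.2)

def smoothenBorder_alt (borderList : List (Int × Int)) : (Int × Int) × (Int × Int) × (Int × Int) × (Int × Int) :=
  let byY := PySem.List.sorted borderList keyYX
  let byX := PySem.List.sorted borderList keyXnegY
  -- byY[-1], byY[0], byX[0], byX[-1]; Python raises IndexError on [] (excluded by Pre_), the defaults are never reached on Pre_
  (byY.getLastD (0, 0), byY.headD (0, 0), byX.headD (0, 0), byX.getLastD (0, 0))

-- ===== PRECONDITION & SPEC =====
-- Pre_ excludes only the empty list, on which A raises IndexError (and B raises IndexError at byY[-1]).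
def Pre_smoothenBorder (borderList : List (Int × Int)) : Prop := borderList ≠ []
instance (borderList : List (Int × Int)) : Decidable (Pre_smoothenBorder borderList) := by unfold Pre_smoothenBorder; infer_instance
def pvWitness_smoothenBorder : (List (Int × Int)) := [(1, 2), (3, 4), (3, 1)]

def Spec_smoothenBorder (borderList : List (Int × Int)) (out : (Int × Int) × (Int × Int) × (Int × Int) × (Int × Int)) : Prop := out = smoothenBorder_alt borderList
instance (borderList : List (Int × Int)) (out : (Int × Int) × (Int × Int) × (Int × Int) × (Int × Int)) : Decidable (Spec_smoothenBorder borderList out) := by unfold Spec_smoothenBorder; infer_instance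

-- ===== CLAIM (what is proved, stated in full; the proofs are below) =====
def Claim_equal_smoothenBorder : Prop := ∀ (borderList : List (Int × Int)), Dom_smoothenBorder borderList → Pre_smoothenBorder borderList → Spec_smoothenBorder borderList (smoothenBorder borderList)

-- ===== LEMMAS AND PROOFS =====

-- Both key maps are injective (the key determines the point)
theorem keyYX_injective : Function.Injective keyYX := by
  intro a b h
  have h' := toLex.injective h
  exact Prod.ext (congrArg Prod.snd h') (congrArg Prod.fst h')

theorem keyXnegY_injective : Function.Injective keyXnegY := by
  intro a b h
  have h' := toLex.injective h
  have h1 := congrArg Prod.fst h'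
  have h2 := congrArg Prod.snd h'
  simp only at h1 h2
  exact Prod.ext h1 (by omega)

-- A's loop branches are exactly strict key comparisons under the two Lex keys
theorem aStep_components (s : (Int × Int) × (Int × Int) × (Int × Int) × (Int × Int)) (p : Int × Int) :
    aStep s p =
      ((if keyYX s.1 < keyYX p then p else s.1),
       (if keyYX p < keyYX s.2.1 then p else s.2.1),
       (if keyXnegY p < keyXnegY s.2.2.1 then p else s.2.2.1),
       (if keyXnegY s.2.2.2 < keyXnegY p then p else s.2.2.2)) := by
  obtain ⟨t, b, l, r⟩ := s
  simp only [aStep, keyYX, keyXnegY, Prod.Lex.lt_iff]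
  refine Prod.ext ?_ (Prod.ext ?_ (Prod.ext ?_ ?_)) <;> simp <;>
    split_ifs <;> simp_all <;> omega

-- generic running-min fold: result is a member with key ≤ every member's key
theorem foldl_minBy_spec {α κ : Type} [LinearOrder κ] (k : α → κ) (t : List α) (h : α) :
    (t.foldl (fun b p => if k p < k b then p else b) h) ∈ h :: t ∧
    ∀ q ∈ h :: t, k (t.foldl (fun b p => if k p < k b then p else b) h) ≤ k q := by
  induction t generalizing h with
  | nil => simp
  | cons p t ih =>
    obtain ⟨hm, hb⟩ := ih (if k p < k h then p else h)
    rw [List.mem_cons] at hm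
    constructor
    · simp only [List.foldl_cons]
      rcases hm with hm | hm
      · rw [hm]; split_ifs <;> simp
      · simp [hm]
    · intro q hq
      have hle : k ((p :: t).foldl (fun b p => if k p < k b then p else b) h) ≤
          k (if k p < k h then p else h) := hb _ (List.mem_cons_self ..)
      simp only [List.mem_cons] at hq
      rcases hq with rfl | rfl | hq
      · exact le_trans hle (by split_ifs with hc <;> [exact le_of_lt hc; exact le_refl _])
      · exact le_trans hle (by split_ifs with hc <;> [exact le_refl _; exact le_of_not_gt hc])
      · exact hb _ (List.mem_cons_of_mem _ hq)

-- generic running-max fold: result is a member with key ≥ every member's key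
theorem foldl_maxBy_spec {α κ : Type} [LinearOrder κ] (k : α → κ) (t : List α) (h : α) :
    (t.foldl (fun b p => if k b < k p then p else b) h) ∈ h :: t ∧
    ∀ q ∈ h :: t, k q ≤ k (t.foldl (fun b p => if k b < k p then p else b) h) := by
  induction t generalizing h with
  | nil => simp
  | cons p t ih =>
    obtain ⟨hm, hb⟩ := ih (if k h < k p then p else h)
    rw [List.mem_cons] at hm
    constructor
    · simp only [List.foldl_cons]
      rcases hm with hm | hm
      · rw [hm]; split_ifs <;> simp
      · simp [hm]
    · intro q hq
      have hle : k (if k h < k p then p else h) ≤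
          k ((p :: t).foldl (fun b p => if k b < k p then p else b) h) := hb _ (List.mem_cons_self ..)
      simp only [List.mem_cons] at hq
      rcases hq with rfl | rfl | hq
      · exact le_trans (by split_ifs with hc <;> [exact le_of_lt hc; exact le_refl _]) hle
      · exact le_trans (by split_ifs with hc <;> [exact le_refl _; exact le_of_not_gt hc]) hle
      · exact hb _ (List.mem_cons_of_mem _ hq)

-- the last element of a ≤-pairwise-sorted nonempty list is a member bounding all keys from above
theorem getLastD_pairwise_spec {α κ : Type} [LinearOrder κ] (k : α → κ) (l : List α) (d : α) :
    l ≠ [] → l.Pairwise (fun a b => k a ≤ k b) →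
    l.getLastD d ∈ l ∧ ∀ q ∈ l, k q ≤ k (l.getLastD d) := by
  induction l generalizing d with
  | nil => intro hne _; cases hne rfl
  | cons x t ih =>
    intro _ hp
    rcases t with _ | ⟨y, t2⟩
    · simp
    · rw [List.getLastD_cons]
      obtain ⟨hm, hb⟩ := ih x (by simp) hp.of_cons
      refine ⟨List.mem_cons_of_mem _ hm, ?_⟩
      intro q hq
      simp only [List.mem_cons] at hq
      rcases hq with rfl | hq
      · exact le_trans ((List.pairwise_cons.mp hp).1 _ hm) (le_refl _)
      · exact hb _ (List.mem_cons.mpr hq)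

-- the head of a stable sort is a member bounding all keys from below
theorem headD_sorted_spec {α κ : Type} [LinearOrder κ] (k : α → κ) (l : List α) (d : α)
    (hne : l ≠ []) :
    (PySem.List.sorted l k).headD d ∈ l ∧ ∀ q ∈ l, k ((PySem.List.sorted l k).headD d) ≤ k q := by
  rcases hs : PySem.List.sorted l k with _ | ⟨m, t⟩
  · exact absurd ((PySem.List.sorted_eq_nil_iff l k false).mp hs) hne
  · refine ⟨?_, ?_⟩
    · have : m ∈ PySem.List.sorted l k := by simp [hs]
      simpa using (PySem.List.mem_sorted l k false m).mp this
    · simpa using PySem.List.key_head_sorted_le l k hs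

-- the last element of a stable sort is a member bounding all keys from above
theorem getLastD_sorted_spec {α κ : Type} [LinearOrder κ] (k : α → κ) (l : List α) (d : α)
    (hne : l ≠ []) :
    (PySem.List.sorted l k).getLastD d ∈ l ∧ ∀ q ∈ l, k q ≤ k ((PySem.List.sorted l k).getLastD d) := by
  have hne' : PySem.List.sorted l k ≠ [] := by
    simpa [PySem.List.sorted_eq_nil_iff] using hne
  obtain ⟨hm, hb⟩ := getLastD_pairwise_spec k (PySem.List.sorted l k) d hne' (PySem.List.sorted_pairwise l k)
  refine ⟨(PySem.List.mem_sorted l k false _).mp hm, ?_⟩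
  intro q hq
  exact hb _ ((PySem.List.mem_sorted l k false q).mpr hq)

-- two members both minimal under an injective key are equal
theorem eq_of_min_min {α κ : Type} [LinearOrder κ] (k : α → κ) (hk : Function.Injective k)
    (l : List α) {a b : α} (ha : a ∈ l) (hb : b ∈ l)
    (hamin : ∀ q ∈ l, k a ≤ k q) (hbmin : ∀ q ∈ l, k b ≤ k q) : a = b :=
  hk (le_antisymm (hamin _ hb) (hbmin _ ha))

-- A's fold computes, componentwise, the four extremal-key folds
theorem fold_split (t : List (Int × Int)) (s : (Int × Int) × (Int × Int) × (Int × Int) × (Int × Int)) :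
    t.foldl aStep s =
      (t.foldl (fun b p => if keyYX b < keyYX p then p else b) s.1,
       t.foldl (fun b p => if keyYX p < keyYX b then p else b) s.2.1,
       t.foldl (fun b p => if keyXnegY p < keyXnegY b then p else b) s.2.2.1,
       t.foldl (fun b p => if keyXnegY b < keyXnegY p then p else b) s.2.2.2) := by
  induction t generalizing s with
  | nil => rfl
  | cons p t ih =>
    simp only [List.foldl_cons]
    rw [aStep_components]
    exact ih _

-- ===== VERDICT (by name: the statement is the Claim_ definition above) =====
theorem smoothenBorder_spec : Claim_equal_smoothenBorder := by
  intro borderList _ hpre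
  show _ = _
  match borderList with
  | [] => exact absurd rfl hpre
  | h :: t =>
    have hne : h :: t ≠ [] := by simp
    simp only [smoothenBorder, smoothenBorder_alt, List.foldl_cons]
    rw [aStep_components]
    simp only [fold_split]
    have hself : ∀ (k : (Int × Int) → Lex (Int × Int)), (if k h < k h then h else h) = h := by
      intro k; simp
    rw [hself, hself]
    obtain ⟨topM, topB⟩ := foldl_maxBy_spec keyYX t h
    obtain ⟨botM, botB⟩ := foldl_minBy_spec keyYX t h
    obtain ⟨leftM, leftB⟩ := foldl_minBy_spec keyXnegY t h
    obtain ⟨rightM, rightB⟩ := foldl_maxBy_spec keyXnegY t h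
    obtain ⟨topM', topB'⟩ := getLastD_sorted_spec keyYX (h :: t) (0, 0) hne
    obtain ⟨botM', botB'⟩ := headD_sorted_spec keyYX (h :: t) (0, 0) hne
    obtain ⟨leftM', leftB'⟩ := headD_sorted_spec keyXnegY (h :: t) (0, 0) hne
    obtain ⟨rightM', rightB'⟩ := getLastD_sorted_spec keyXnegY (h :: t) (0, 0) hne
    refine Prod.ext ?_ (Prod.ext ?_ (Prod.ext ?_ ?_))
    · exact keyYX_injective (le_antisymm (topB' _ topM) (topB _ topM'))
    · exact eq_of_min_min keyYX keyYX_injective (h :: t) botM botM' botB botB'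
    · exact eq_of_min_min keyXnegY keyXnegY_injective (h :: t) leftM leftM' leftB leftB'
    · exact keyXnegY_injective (le_antisymm (rightB' _ rightM) (rightB _ rightM'))
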